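-- pv_equiv track=rewrite | github.com/lesleslie/crackerjack | crackerjack/agents/documentation_agent.py | _insert_changelog_entry
-- ===== SOURCE A (Python) =====
-- def _insert_changelog_entry(content: str, entry: str) -> str:
--     lines = content.split("\n")
--
--     insert_index = 0
--     for i, line in enumerate(lines):
--         if line.startswith(("# ", "## ")) and i > 0:
--             insert_index = i
--             break
--
--     new_lines = (
--         lines[:insert_index] + entry.split("\n") + [""] + lines[insert_index:]
--     )
--     return "\n".join(new_lines)
-- ===== SOURCE B (Python) =====
-- import re
--
-- def _insert_changelog_entry(content: str, entry: str) -> str: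
--     m = re.search(r"\n(# |## )", content)
--     offset = m.start() + 1 if m else 0
--     return content[:offset] + entry + "\n\n" + content[offset:]
-- ===== Notes on version B (the rewrite author's own statement) =====
-- stated objective: idiomatic
-- what changed: B replaces A's split-into-lines, enumerate-loop for the insertion index and list rebuild + join by a single regex scan of the raw string (re.search(r"\n(# |## )")) and one string splice content[:offset] + entry + "\n\n" + content[offset:].
import Mathlib
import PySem

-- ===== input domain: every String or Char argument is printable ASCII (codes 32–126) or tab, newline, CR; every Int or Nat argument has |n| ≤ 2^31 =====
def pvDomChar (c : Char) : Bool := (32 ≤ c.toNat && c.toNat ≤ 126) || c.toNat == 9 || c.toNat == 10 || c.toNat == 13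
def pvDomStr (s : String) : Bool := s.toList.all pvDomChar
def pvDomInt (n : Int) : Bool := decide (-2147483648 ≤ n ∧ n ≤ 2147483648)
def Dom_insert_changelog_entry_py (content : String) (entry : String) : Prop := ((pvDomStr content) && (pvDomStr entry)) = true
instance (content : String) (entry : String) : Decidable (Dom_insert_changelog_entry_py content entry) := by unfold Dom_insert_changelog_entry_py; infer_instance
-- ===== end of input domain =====

-- B replaces A's split-into-lines + index loop + list rebuild + join by one raw-string scan for "\n# "/"\n## " and a single splice; same output (idiomatic rewrite, no speed claim).

-- ===== PORT A =====
-- line.startswith(("# ", "## "))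
def pyHeadMatch (line : List Char) : Bool :=
  PySem.Chars.startswith line ['#', ' '] || PySem.Chars.startswith line ['#', '#', ' ']

-- for i, line in enumerate(lines): if line.startswith(...) and i > 0: insert_index = i; break
def pyFindInsertIndex : List (List Char) → Nat → Nat
  | [], _ => 0
  | line :: rest, i => if pyHeadMatch line && decide (0 < i) then i else pyFindInsertIndex rest (i + 1)

def insert_changelog_entry_py (content : String) (entry : String) : String :=
  let lines := PySem.Chars.splitOn content.toList ['\n']
  let insertIndex := pyFindInsertIndex lines 0
  let newLines := lines.take insertIndex ++ PySem.Chars.splitOn entry.toList ['\n']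
      ++ [([] : List Char)] ++ lines.drop insertIndex
  String.ofList (PySem.Chars.join ['\n'] newLines)

-- ===== PORT B =====
-- the regex alternative "(# |## )" tried right after a "\n"
def altIsHeadingAt (cs : List Char) : Bool :=
  PySem.Chars.startswith cs ['#', ' '] || PySem.Chars.startswith cs ['#', '#', ' ']

-- re.search(r"\n(# |## )", content): offset (= m.start() + 1) just past the first "\n" that is followed by a heading start
def altScan : List Char → Option Nat
  | [] => none
  | c :: rest => if c == '\n' && altIsHeadingAt rest then some 1 else (altScan rest).map (· + 1)

def insert_changelog_entry_py_alt (content : String) (entry : String) : String :=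
  let cs := content.toList
  let offset := (altScan cs).getD 0
  String.ofList (cs.take offset ++ entry.toList ++ ['\n', '\n'] ++ cs.drop offset)

-- ===== PRECONDITION & SPEC =====
def Spec_insert_changelog_entry_py (content : String) (entry : String) (out : String) : Prop := out = insert_changelog_entry_py_alt content entry
instance (content : String) (entry : String) (out : String) : Decidable (Spec_insert_changelog_entry_py content entry out) := by unfold Spec_insert_changelog_entry_py; infer_instance

-- ===== CLAIM (what is proved, stated in full; the proofs are below) =====
def Claim_equal_insert_changelog_entry_py : Prop := ∀ (content : String) (entry : String), Dom_insert_changelog_entry_py content entry → Spec_insert_changelog_entry_py content entry (insert_changelog_entry_py content entry)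

-- ===== LEMMAS AND PROOFS =====
def mySplit : List Char → List (List Char)
  | [] => [[]]
  | c :: t => if c = '\n' then [] :: mySplit t else (c :: (mySplit t).headI) :: (mySplit t).tail
def consHead (p : List Char) : List (List Char) → List (List Char)
  | [] => [p]
  | l :: L => (p ++ l) :: L
theorem mySplit_ne_nil (cs : List Char) : mySplit cs ≠ [] := by
  cases cs <;> simp [mySplit]; split <;> simp
theorem go_spec : ∀ (fuel : Nat) (l cur : List Char) (acc : List (List Char)), l.length ≤ fuel →
    PySem.Chars.splitOn.go ['\n'] fuel l cur acc = acc.reverse ++ consHead cur.reverse (mySplit l) := by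
  intro fuel
  induction fuel with
  | zero =>
    intro l cur acc h
    have : l = [] := by cases l <;> simp_all
    subst this
    simp [PySem.Chars.splitOn.go, mySplit, consHead]
  | succ n ih =>
    intro l cur acc h
    cases l with
    | nil => simp [PySem.Chars.splitOn.go, mySplit, consHead]
    | cons c rest =>
      by_cases hc : c = '\n'
      · subst hc
        rw [show PySem.Chars.splitOn.go ['\n'] (n+1) ('\n'::rest) cur acc
              = PySem.Chars.splitOn.go ['\n'] n (List.drop 1 ('\n'::rest)) [] (cur.reverse :: acc) by
            simp [PySem.Chars.splitOn.go, List.isPrefixOf]]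
        rw [ih _ _ _ (by simpa using Nat.le_of_succ_le_succ h)]
        have hne := mySplit_ne_nil rest
        cases hr : mySplit rest with
        | nil => exact absurd hr hne
        | cons a L => simp [mySplit, consHead, hr]
      · rw [show PySem.Chars.splitOn.go ['\n'] (n+1) (c::rest) cur acc
              = PySem.Chars.splitOn.go ['\n'] n rest (c :: cur) acc by
            simp [PySem.Chars.splitOn.go, List.isPrefixOf]
            exact fun h' => absurd h'.symm hc]
        rw [ih _ _ _ (by simpa using Nat.le_of_succ_le_succ h)]
        have hne := mySplit_ne_nil rest
        cases hr : mySplit rest with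
        | nil => exact absurd hr hne
        | cons a L => simp [mySplit, consHead, hr, hc]
theorem splitOn_eq (cs : List Char) : PySem.Chars.splitOn cs ['\n'] = mySplit cs := by
  rw [PySem.Chars.splitOn, go_spec (cs.length+1) cs [] [] (by omega)]
  have hne := mySplit_ne_nil cs
  cases hr : mySplit cs with
  | nil => exact absurd hr hne
  | cons a L => simp [consHead]
theorem join_cons (sep x : List Char) (L : List (List Char)) (h : L ≠ []) :
    PySem.Chars.join sep (x :: L) = x ++ sep ++ PySem.Chars.join sep L := by
  cases L with
  | nil => exact absurd rfl h
  | cons y t => exact PySem.Chars.join_cons_cons sep x y t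
theorem join_mySplit (cs : List Char) : PySem.Chars.join ['\n'] (mySplit cs) = cs := by
  induction cs with
  | nil => simp [mySplit, PySem.Chars.join_singleton]
  | cons c t ih =>
    by_cases hc : c = '\n'
    · subst hc
      rw [mySplit, if_pos rfl, join_cons _ _ _ (mySplit_ne_nil t), ih]
      simp
    · rw [mySplit, if_neg hc]
      have hne := mySplit_ne_nil t
      cases hr : mySplit t with
      | nil => exact absurd hr hne
      | cons a L =>
        rw [hr] at ih
        cases L with
        | nil => simpa [PySem.Chars.join_singleton] using ih
        | cons b T =>
          rw [List.headI, List.tail, PySem.Chars.join_cons_cons]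
          rw [PySem.Chars.join_cons_cons] at ih
          simpa using ih
theorem isPrefixOf_headI : ∀ (cs p : List Char), '\n' ∉ p →
    (p.isPrefixOf ((mySplit cs).headI)) = (p.isPrefixOf cs) := by
  intro cs
  induction cs with
  | nil => intro p _; simp [mySplit]
  | cons c t ih =>
    intro p hp
    by_cases hc : c = '\n'
    · subst hc
      rw [mySplit, if_pos rfl]
      cases p with
      | nil => simp [List.isPrefixOf]
      | cons q p' =>
        have hq : q ≠ '\n' := fun h => hp (h ▸ List.mem_cons_self ..)
        simp [List.isPrefixOf, List.headI, hq]
    · rw [mySplit, if_neg hc]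
      cases p with
      | nil => simp [List.isPrefixOf]
      | cons q p' =>
        simp only [List.headI_cons, List.isPrefixOf]
        rw [ih p' (fun h => hp (List.mem_cons_of_mem _ h))]
theorem headMatch_headI (cs : List Char) : pyHeadMatch ((mySplit cs).headI) = altIsHeadingAt cs := by
  simp only [pyHeadMatch, altIsHeadingAt, PySem.Chars.startswith,
    isPrefixOf_headI cs ['#', ' '] (by decide), isPrefixOf_headI cs ['#', '#', ' '] (by decide)]
theorem fii_pos : ∀ (L : List (List Char)) (k : Nat), 1 ≤ k →
    pyFindInsertIndex L k = ((L.findIdx? pyHeadMatch).map (k + ·)).getD 0 := by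
  intro L
  induction L with
  | nil => intro k _; simp [pyFindInsertIndex]
  | cons line rest ih =>
    intro k hk
    by_cases h : pyHeadMatch line
    · simp [pyFindInsertIndex, h, List.findIdx?_cons, Nat.lt_of_lt_of_le Nat.zero_lt_one hk]
    · rw [pyFindInsertIndex, if_neg (by simp [h]), ih (k+1) (by omega)]
      rw [List.findIdx?_cons, if_neg (by simp [h])]
      cases hr : rest.findIdx? pyHeadMatch <;> simp [Nat.add_comm, Nat.add_left_comm]
theorem join_cons_head (sep : List Char) (c : Char) (h : List Char) (X : List (List Char)) :
    PySem.Chars.join sep ((c :: h) :: X) = c :: PySem.Chars.join sep (h :: X) := by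
  cases X with
  | nil => simp [PySem.Chars.join_singleton]
  | cons y t => rw [PySem.Chars.join_cons_cons, PySem.Chars.join_cons_cons]; simp
theorem main_scan (cs : List Char) :
    (altScan cs = none → (mySplit cs).tail.findIdx? pyHeadMatch = none) ∧
    (∀ off, altScan cs = some off → ∃ j, (mySplit cs).tail.findIdx? pyHeadMatch = some j ∧
       cs.take off = PySem.Chars.join ['\n'] ((mySplit cs).take (j+1)) ++ ['\n'] ∧
       cs.drop off = PySem.Chars.join ['\n'] ((mySplit cs).drop (j+1))) := by
  induction cs with
  | nil => exact ⟨fun _ => by simp [mySplit], fun off h => by simp [altScan] at h⟩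
  | cons c rest ih =>
    by_cases hc : c = '\n'
    · subst hc
      by_cases hh : altIsHeadingAt rest
      · -- match at offset 1, heading is line index 0 of the tail
        constructor
        · intro h; rw [altScan, if_pos (by simp [hh])] at h; exact absurd h (by simp)
        · intro off h
          rw [altScan, if_pos (by simp [hh])] at h
          obtain rfl : (1 : Nat) = off := Option.some.inj h
          refine ⟨0, ?_, ?_, ?_⟩
          · rw [mySplit, if_pos rfl, List.tail_cons]
            have hne := mySplit_ne_nil rest
            cases hr : mySplit rest with
            | nil => exact absurd hr hne
            | cons a L =>
              have : pyHeadMatch a = true := by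
                have h2 := headMatch_headI rest; rw [hr, List.headI_cons] at h2
                rw [h2]; exact hh
              simp [List.findIdx?_cons, this]
          · simp [mySplit, PySem.Chars.join_singleton]
          · rw [mySplit, if_pos rfl]
            simpa using (join_mySplit rest).symm
      · -- no match at offset 1; shift the tail scan by one
        rw [mySplit, if_pos rfl]
        have hstep : altScan ('\n' :: rest) = (altScan rest).map (· + 1) := by
          rw [altScan, if_neg (by simp [hh])]
        have hfi : (mySplit rest).findIdx? pyHeadMatch
            = ((mySplit rest).tail.findIdx? pyHeadMatch).map (· + 1) := by
          have hne := mySplit_ne_nil rest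
          cases hr : mySplit rest with
          | nil => exact absurd hr hne
          | cons a L =>
            have ha : pyHeadMatch a = false := by
              have h2 := headMatch_headI rest; rw [hr, List.headI_cons] at h2
              rw [h2]; simpa using hh
            simp [List.findIdx?_cons, ha]
        constructor
        · intro h
          rw [hstep] at h
          have : altScan rest = none := by cases hx : altScan rest <;> simp [hx] at h ⊢
          rw [List.tail_cons, hfi, ih.1 this]
          rfl
        · intro off h
          rw [hstep] at h
          cases hx : altScan rest with
          | none => rw [hx] at h; simp at h
          | some off' =>
            rw [hx] at h
            obtain rfl : off' + 1 = off := by simpa using h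
            obtain ⟨j, hj, htake, hdrop⟩ := ih.2 off' hx
            refine ⟨j + 1, ?_, ?_, ?_⟩
            · rw [List.tail_cons, hfi, hj]; rfl
            · have hXne : (mySplit rest).take (j+1) ≠ [] := by
                simp [List.take_eq_nil_iff, mySplit_ne_nil rest]
              rw [List.take_succ_cons, List.take_succ_cons, join_cons _ _ _ hXne, htake]
              simp
            · rw [List.drop_succ_cons, List.drop_succ_cons]
              exact hdrop
    · -- c is an ordinary character: it is prepended to line 0, tails agree
      have hstep : altScan (c :: rest) = (altScan rest).map (· + 1) := by
        rw [altScan, if_neg (by simp [hc])]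
      have hne := mySplit_ne_nil rest
      cases hr : mySplit rest with
      | nil => exact absurd hr hne
      | cons h0 T =>
        have hms : mySplit (c :: rest) = (c :: h0) :: T := by
          rw [mySplit, if_neg hc, hr, List.headI_cons, List.tail_cons]
        constructor
        · intro h
          rw [hstep] at h
          have hx : altScan rest = none := by cases hx : altScan rest <;> simp [hx] at h ⊢
          have := ih.1 hx
          rw [hr, List.tail_cons] at this
          rw [hms, List.tail_cons]
          exact this
        · intro off h
          rw [hstep] at h
          cases hx : altScan rest with
          | none => rw [hx] at h; simp at h
          | some off' =>
            rw [hx] at h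
            obtain rfl : off' + 1 = off := by simpa using h
            obtain ⟨j, hj, htake, hdrop⟩ := ih.2 off' hx
            rw [hr, List.tail_cons] at hj
            rw [hr, List.take_succ_cons] at htake
            rw [hr, List.drop_succ_cons] at hdrop
            refine ⟨j, ?_, ?_, ?_⟩
            · rw [hms, List.tail_cons]; exact hj
            · rw [hms, List.take_succ_cons, List.take_succ_cons, join_cons_head, htake]
              simp
            · rw [hms, List.drop_succ_cons, List.drop_succ_cons]
              exact hdrop
theorem join_append (sep : List Char) (X Y : List (List Char)) (hX : X ≠ []) (hY : Y ≠ []) :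
    PySem.Chars.join sep (X ++ Y) = PySem.Chars.join sep X ++ sep ++ PySem.Chars.join sep Y := by
  induction X with
  | nil => exact absurd rfl hX
  | cons x t ih =>
    cases t with
    | nil => simpa [PySem.Chars.join_singleton] using join_cons sep x Y hY
    | cons y tt =>
      rw [List.cons_append, join_cons sep x ((y :: tt) ++ Y) (by simp),
          join_cons sep x (y :: tt) (by simp), ih (by simp)]
      simp

theorem pv_ports_eq (content entry : String) :
    insert_changelog_entry_py content entry = insert_changelog_entry_py_alt content entry := by
  unfold insert_changelog_entry_py insert_changelog_entry_py_alt
  simp only [splitOn_eq]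
  obtain ⟨l0, L1, hM⟩ : ∃ l0 L1, mySplit content.toList = l0 :: L1 := by
    cases h : mySplit content.toList with
    | nil => exact absurd h (mySplit_ne_nil _)
    | cons a L => exact ⟨a, L, rfl⟩
  have hfi0 : pyFindInsertIndex (mySplit content.toList) 0 = pyFindInsertIndex L1 1 := by
    rw [hM, pyFindInsertIndex]; simp
  cases hsc : altScan content.toList with
  | none =>
    have h1 := (main_scan content.toList).1 hsc
    rw [hM, List.tail_cons] at h1
    rw [hfi0, fii_pos L1 1 le_rfl, h1]
    simp only [Option.map_none, Option.getD_none, List.take_zero, List.drop_zero,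
      List.nil_append]
    congr 1
    rw [List.append_assoc, join_append _ _ _ (mySplit_ne_nil _) (by simp),
      List.singleton_append, join_cons _ _ _ (mySplit_ne_nil _), join_mySplit, join_mySplit]
    simp
  | some off =>
    obtain ⟨j, hj, htake, hdrop⟩ := (main_scan content.toList).2 off hsc
    rw [hM, List.tail_cons] at hj
    have hjlt : j < L1.length := by
      have := List.findIdx?_eq_some_iff_findIdx_eq.mp hj; omega
    rw [hfi0, fii_pos L1 1 le_rfl, hj]
    simp only [Option.map_some, Option.getD_some, Nat.add_comm 1 j]
    have hTne : (mySplit content.toList).take (j+1) ≠ [] := by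
      simp [List.take_eq_nil_iff, mySplit_ne_nil content.toList]
    have hDne : (mySplit content.toList).drop (j+1) ≠ [] := by
      have hlen : j + 1 < (mySplit content.toList).length := by rw [hM]; simp; omega
      simp [List.drop_eq_nil_iff]; omega
    congr 1
    rw [List.append_assoc, List.append_assoc,
      join_append _ _ _ hTne (by simp),
      join_append _ _ _ (mySplit_ne_nil _) (by simp),
      List.singleton_append, join_cons _ _ _ hDne, join_mySplit, htake, hdrop]
    simp

-- ===== VERDICT (by name: the statement is the Claim_ definition above) =====
theorem insert_changelog_entry_py_spec : Claim_equal_insert_changelog_entry_py := by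
  intro content entry _
  unfold Spec_insert_changelog_entry_py
  exact pv_ports_eq content entry
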